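-- pv_equiv track=rewrite | github.com/paskal98/WebPulseGPT | agent/consilidate_dict.py | consolidate_duplicates
-- ===== SOURCE A (Python) =====
-- def consolidate_duplicates(arr):
--     append_text = "\n\n"
--
--     consolidated = {}
--     seen_keys = set()
--
--     for dictionary in arr:
--         for key, value in dictionary.items():
--             if key in seen_keys:
--                 consolidated[key] = "\n```"+consolidated[key]+"```" + append_text + "```" + value + "\n```"
--             else:
--                 consolidated[key] = value
--                 seen_keys.add(key)
--
--     new_arr = [{key: value} for key, value in consolidated.items()]
--     return new_arr
-- ===== SOURCE B (Python) =====
-- def consolidate_duplicates(arr):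
--     # group-then-format: collect each key's values in first-seen order, then fold each group
--     groups = {}
--     for dictionary in arr:
--         for key, value in dictionary.items():
--             groups.setdefault(key, []).append(value)
--
--     def fold(vals):
--         acc = vals[0]
--         for v in vals[1:]:
--             acc = "\n```" + acc + "```" + "\n\n" + "```" + v + "\n```"
--         return acc
--
--     return [{key: fold(vals)} for key, vals in groups.items()]
-- ===== Notes on version B (the rewrite author's own statement) =====
-- stated objective: alternative
-- what changed: Replaces A's single interleaved loop that re-wraps the growing accumulator string on every duplicate with a two-pass group-then-format shape: one pass builds key -> ordered value list, a second pass left-folds each group with the wrap combinator and emits the singleton dicts.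
import Mathlib
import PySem

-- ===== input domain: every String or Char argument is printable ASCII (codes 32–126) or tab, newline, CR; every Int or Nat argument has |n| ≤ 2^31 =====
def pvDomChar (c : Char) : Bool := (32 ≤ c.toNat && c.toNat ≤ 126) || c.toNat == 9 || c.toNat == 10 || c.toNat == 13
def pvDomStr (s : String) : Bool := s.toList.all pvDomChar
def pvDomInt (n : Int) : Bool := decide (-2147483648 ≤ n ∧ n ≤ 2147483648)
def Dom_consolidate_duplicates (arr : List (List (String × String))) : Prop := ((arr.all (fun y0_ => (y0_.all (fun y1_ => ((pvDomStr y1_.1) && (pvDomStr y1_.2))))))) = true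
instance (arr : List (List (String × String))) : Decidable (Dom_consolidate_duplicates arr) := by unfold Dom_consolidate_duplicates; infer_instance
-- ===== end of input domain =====

-- B replaces A's interleaved wrap-as-you-go loop by a group-then-format two-pass shape (alternative decomposition, same cost).


-- ===== PORT A =====
-- literal transliteration of A: one loop over all (key, value) pairs; a duplicate key
-- re-wraps the current consolidated string ("append_text" = "\n\n" inlined).
def consolidate_duplicates (arr : List (List (String × String))) : List (List (String × String)) :=
  let st := arr.foldl
    (fun (st : PySem.Dict String String × PySem.Set String) dictionary =>
      dictionary.foldl
        (fun st kv =>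
          if PySem.Set.contains st.2 kv.1 then
            (st.1.insert kv.1 ("\n```" ++ st.1.getD kv.1 "" ++ "```" ++ "\n\n" ++ "```" ++ kv.2 ++ "\n```"), st.2)
          else
            (st.1.insert kv.1 kv.2, PySem.Set.add st.2 kv.1))
        st)
    ((PySem.Dict.empty : PySem.Dict String String), (PySem.Set.empty : PySem.Set String))
  st.1.items.map (fun kv => [(kv.1, kv.2)])

-- ===== PORT B =====
-- B's fold helper: acc = vals[0]; for v in vals[1:]: acc = wrap(acc, v).
-- B only ever applies it to non-empty groups; on [] Python's vals[0] would raise, here "" (unreachable).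
def pvFold1 (vals : List String) : String :=
  match vals with
  | [] => ""
  | a :: rest => rest.foldl (fun acc v => "\n```" ++ acc ++ "```" ++ "\n\n" ++ "```" ++ v ++ "\n```") a

-- literal transliteration of B: pass 1 groups values per key (setdefault(k, []).append(v)),
-- pass 2 folds each group and emits singleton dicts.
def consolidate_duplicates_alt (arr : List (List (String × String))) : List (List (String × String)) :=
  let groups := arr.foldl
    (fun (g : PySem.Dict String (List String)) dictionary =>
      dictionary.foldl (fun g kv => g.modify kv.1 [] (· ++ [kv.2])) g)
    (PySem.Dict.empty : PySem.Dict String (List String))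
  groups.items.map (fun kv => [(kv.1, pvFold1 kv.2)])

-- ===== PRECONDITION & SPEC =====
def Spec_consolidate_duplicates (arr : List (List (String × String))) (out : List (List (String × String))) : Prop := out = consolidate_duplicates_alt arr
instance (arr : List (List (String × String))) (out : List (List (String × String))) : Decidable (Spec_consolidate_duplicates arr out) := by unfold Spec_consolidate_duplicates; infer_instance

-- ===== CLAIM (what is proved, stated in full; the proofs are below) =====
def Claim_equal_consolidate_duplicates : Prop := ∀ (arr : List (List (String × String))), Dom_consolidate_duplicates arr → Spec_consolidate_duplicates arr (consolidate_duplicates arr)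

-- ===== LEMMAS AND PROOFS =====

-- the one-pair step of A's loop
def pvStepA (st : PySem.Dict String String × PySem.Set String) (kv : String × String) :
    PySem.Dict String String × PySem.Set String :=
  if PySem.Set.contains st.2 kv.1 then
    (st.1.insert kv.1 ("\n```" ++ st.1.getD kv.1 "" ++ "```" ++ "\n\n" ++ "```" ++ kv.2 ++ "\n```"), st.2)
  else
    (st.1.insert kv.1 kv.2, PySem.Set.add st.2 kv.1)

-- the one-pair step of B's grouping loop
def pvStepB (g : PySem.Dict String (List String)) (kv : String × String) : PySem.Dict String (List String) :=
  g.modify kv.1 [] (· ++ [kv.2])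

-- the invariant tying A's state to B's groups
def pvInv (st : PySem.Dict String String × PySem.Set String) (g : PySem.Dict String (List String)) : Prop :=
  st.2 = st.1.keys ∧
  st.1.items = g.items.map (fun kv => (kv.1, pvFold1 kv.2)) ∧
  g.keys.Nodup ∧
  ∀ p ∈ g.items, p.2 ≠ []

theorem pvFold1_append (vs : List String) (v : String) (h : vs ≠ []) :
    pvFold1 (vs ++ [v]) = "\n```" ++ pvFold1 vs ++ "```" ++ "\n\n" ++ "```" ++ v ++ "\n```" := by
  cases vs with
  | nil => exact absurd rfl h
  | cons a rest => simp [pvFold1, List.foldl_append]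

theorem pvStep_inv (st : PySem.Dict String String × PySem.Set String)
    (g : PySem.Dict String (List String)) (kv : String × String)
    (h : pvInv st g) : pvInv (pvStepA st kv) (pvStepB g kv) := by
  obtain ⟨d, seen⟩ := st
  obtain ⟨k, v⟩ := kv
  obtain ⟨hseen, hitems, hnd, hne⟩ := h
  simp only at hseen hitems
  have hkeys : d.keys = g.keys := by
    simp only [PySem.Dict.keys, hitems, List.map_map]
    rfl
  have hmod : pvStepB g (k, v) = g.insert k (g.getD k [] ++ [v]) := rfl
  by_cases hc : k ∈ g.keys
  · -- duplicate key
    have hcs : PySem.Set.contains seen k = true := by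
      rw [hseen, hkeys]; simp [PySem.Set.contains, List.contains_eq_mem]; exact hc
    have hgc : g.contains k = true := (PySem.Dict.contains_iff_mem_keys g k).2 hc
    have hdc : d.contains k = true := (PySem.Dict.contains_iff_mem_keys d k).2 (hkeys ▸ hc)
    -- the group currently stored at k
    obtain ⟨p, hp, hpk⟩ : ∃ p ∈ g.items, p.1 = k := by
      simpa [PySem.Dict.keys] using hc
    have hp' : (k, p.2) ∈ g.items := hpk ▸ hp
    set vs := p.2 with hvsdef
    have hvs : g.getD k [] = vs := PySem.Dict.getD_of_mem_items g hp' hnd []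
    have hdnd : d.keys.Nodup := hkeys ▸ hnd
    have hdv : d.getD k "" = pvFold1 vs := by
      refine PySem.Dict.getD_of_mem_items d ?_ hdnd ""
      rw [hitems]
      exact List.mem_map.2 ⟨(k, vs), hp', rfl⟩
    have hvne : vs ≠ [] := hne (k, vs) hp'
    unfold pvStepA
    rw [hmod]
    simp only [hcs, if_true]
    refine ⟨?_, ?_, ?_, ?_⟩
    · simpa [hseen] using (PySem.Dict.keys_insert_of_contains d _ hdc).symm
    · rw [PySem.Dict.items_insert_of_contains d _ hdc,
          PySem.Dict.items_insert_of_contains g _ hgc, hitems, List.map_map, List.map_map]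
      apply List.map_congr_left
      intro q hq
      by_cases hqk : q.1 = k
      · simp [Function.comp, hqk, hdv, hvs, pvFold1_append vs v hvne]
      · simp [Function.comp, hqk]
    · rwa [PySem.Dict.keys_insert_of_contains g _ hgc]
    · intro q hq
      rw [PySem.Dict.items_insert_of_contains g _ hgc] at hq
      obtain ⟨r, hr, hrq⟩ := List.mem_map.1 hq
      by_cases hrk : r.1 = k
      · simp [hrk] at hrq; simp [← hrq]
      · simp [hrk] at hrq; exact hrq ▸ hne r hr
  · -- fresh key
    have hcs : PySem.Set.contains seen k = false := by
      rw [hseen, hkeys]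
      simp [PySem.Set.contains, List.contains_eq_mem]; exact hc
    have hgc : g.contains k = false := by
      rw [← Bool.not_eq_true, PySem.Dict.contains_iff_mem_keys]; exact hc
    have hdc : d.contains k = false := by
      rw [← Bool.not_eq_true, PySem.Dict.contains_iff_mem_keys, hkeys]; exact hc
    have hadd : PySem.Set.add seen k = seen ++ [k] := by
      have : PySem.Set.contains seen k = false := hcs
      simp [PySem.Set.add, PySem.Set.contains] at this ⊢
      simp [this]
    unfold pvStepA
    rw [hmod]
    simp only [hcs, Bool.false_eq_true, if_false]
    have hgd : g.getD k [] = [] := PySem.Dict.getD_of_not_contains g [] hgc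
    refine ⟨?_, ?_, ?_, ?_⟩
    · rw [hadd, PySem.Dict.keys_insert_of_not_contains d _ hdc, hseen]
    · rw [PySem.Dict.items_insert_of_not_contains d _ hdc,
          PySem.Dict.items_insert_of_not_contains g _ hgc, hitems, List.map_append, hgd]
      simp [pvFold1]
    · rw [PySem.Dict.keys_insert_of_not_contains g _ hgc]
      simp only [List.nodup_append, List.nodup_singleton, true_and]
      refine ⟨hnd, ?_⟩
      intro a ha b hb
      simp only [List.mem_singleton] at hb
      exact fun h => hc ((hb ▸ h) ▸ ha)
    · intro q hq
      rw [PySem.Dict.items_insert_of_not_contains g _ hgc] at hq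
      rcases List.mem_append.1 hq with h1 | h1
      · exact hne q h1
      · simp at h1; simp [h1, hgd]

theorem pvFold_inv (ps : List (String × String))
    (st : PySem.Dict String String × PySem.Set String) (g : PySem.Dict String (List String))
    (h : pvInv st g) : pvInv (ps.foldl pvStepA st) (ps.foldl pvStepB g) := by
  induction ps generalizing st g with
  | nil => exact h
  | cons p ps ih => exact ih _ _ (pvStep_inv st g p h)

theorem pvPortA_eq (arr : List (List (String × String))) :
    consolidate_duplicates arr =
      ((arr.flatten.foldl pvStepA ((PySem.Dict.empty : PySem.Dict String String), (PySem.Set.empty : PySem.Set String))).1.items.map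
        fun kv => [(kv.1, kv.2)]) := by
  unfold consolidate_duplicates
  rw [List.foldl_flatten]
  rfl

theorem pvPortB_eq (arr : List (List (String × String))) :
    consolidate_duplicates_alt arr =
      ((arr.flatten.foldl pvStepB (PySem.Dict.empty : PySem.Dict String (List String))).items.map
        fun kv => [(kv.1, pvFold1 kv.2)]) := by
  unfold consolidate_duplicates_alt
  rw [List.foldl_flatten]
  rfl

-- ===== VERDICT (by name: the statement is the Claim_ definition above) =====
theorem consolidate_duplicates_spec : Claim_equal_consolidate_duplicates := by
  intro arr _
  unfold Spec_consolidate_duplicates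
  rw [pvPortA_eq, pvPortB_eq]
  have base : pvInv ((PySem.Dict.empty : PySem.Dict String String), (PySem.Set.empty : PySem.Set String))
      (PySem.Dict.empty : PySem.Dict String (List String)) := by
    refine ⟨rfl, rfl, ?_, ?_⟩
    · simp [PySem.Dict.keys_empty]
    · intro p hp
      simp [PySem.Dict.empty] at hp
  obtain ⟨-, hitems, -, -⟩ := pvFold_inv arr.flatten _ _ base
  rw [hitems, List.map_map]
  rfl
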